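-- pv_equiv track=rewrite | github.com/durr1602/gyoza | workflow/scripts/my_functions.py | get_nt_seq
-- ===== SOURCE A (Python) =====
-- def get_nt_seq(seq, mut_dic):
--     """
--     Reconstitutes a nucleotide sequence based on a dictionary of mutations,
--     containing positions and alternative codons.
--     """
--     list_codons = [
--         seq[i : i + 3]
--         for i in range(0, len(seq), 3)  # Convert nucleotide sequence to list of codons
--     ]
--
--     for pos, mut_codon in mut_dic.items():
--         if 0 <= pos < len(list_codons):
--             list_codons[pos] = mut_codon
--
--     return "".join(list_codons)
-- ===== SOURCE B (Python) =====
-- def get_nt_seq(seq, mut_dic):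
--     """
--     Reconstitutes a nucleotide sequence based on a dictionary of mutations,
--     containing positions and alternative codons.
--     """
--     n_codons = (len(seq) + 2) // 3
--     muts = sorted(
--         ((p, c) for p, c in mut_dic.items() if 0 <= p < n_codons),
--         key=lambda t: t[0],
--     )
--     parts = []
--     cur = 0
--     for pos, codon in muts:
--         parts.append(seq[cur : 3 * pos])
--         parts.append(codon)
--         cur = 3 * pos + 3
--     parts.append(seq[cur:])
--     return "".join(parts)
-- ===== Notes on version B (the rewrite author's own statement) =====
-- stated objective: alternative
-- what changed: B replaces A's build-then-patch over all codons (materialise the full codon list, then loop over the mutations assigning into it) by a mutation-driven splice: it sorts the in-range mutations by position and emits the untouched stretches of seq between consecutive mutated codons directly, so the per-codon list never exists.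
import Mathlib
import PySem

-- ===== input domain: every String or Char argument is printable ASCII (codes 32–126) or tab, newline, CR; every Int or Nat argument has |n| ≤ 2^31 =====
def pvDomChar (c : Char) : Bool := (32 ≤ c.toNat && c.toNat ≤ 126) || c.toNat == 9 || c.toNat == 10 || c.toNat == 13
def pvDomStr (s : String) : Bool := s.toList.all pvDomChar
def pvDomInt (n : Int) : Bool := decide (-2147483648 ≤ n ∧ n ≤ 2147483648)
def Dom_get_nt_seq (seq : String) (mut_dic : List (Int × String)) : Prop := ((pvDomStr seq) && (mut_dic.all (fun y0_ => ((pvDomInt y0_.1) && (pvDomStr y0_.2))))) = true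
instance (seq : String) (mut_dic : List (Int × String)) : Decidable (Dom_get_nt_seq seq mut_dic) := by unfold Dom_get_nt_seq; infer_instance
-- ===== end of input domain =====

-- B replaces A's build-then-patch over all codons by a mutation-driven splice: sort the in-range
-- mutations by position, then emit the untouched stretches of seq between mutated codons directly.
-- Objective: alternative (different algorithm, similar cost).

-- ===== PORT A =====
def get_nt_seq (seq : String) (mut_dic : List (Int × String)) : String :=
  let list_codons : List String :=
    (PySem.List.pyRange 0 (PySem.Str.len seq) 3).map
      (fun i => PySem.Str.slice seq (some i) (some (i + 3)))
  let patched : List String :=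
    mut_dic.foldl
      (fun cs pm =>
        if 0 ≤ pm.1 ∧ pm.1 < PySem.List.len cs then PySem.List.pySetD cs pm.1 pm.2 else cs)
      list_codons
  PySem.Str.join "" patched

-- ===== PORT B =====
def get_nt_seq_alt (seq : String) (mut_dic : List (Int × String)) : String :=
  let n_codons : Int := PySem.Int.floordiv (PySem.Str.len seq + 2) 3
  let muts : List (Int × String) :=
    PySem.List.sorted (mut_dic.filter (fun t => decide (0 ≤ t.1 ∧ t.1 < n_codons)))
      (fun t => t.1)
  let r : List String × Int :=
    muts.foldl
      (fun (acc : List String × Int) t =>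
        (acc.1 ++ [PySem.Str.slice seq (some acc.2) (some (3 * t.1)), t.2], 3 * t.1 + 3))
      ([], 0)
  PySem.Str.join "" (r.1 ++ [PySem.Str.slice seq (some r.2) none])

-- ===== PRECONDITION & SPEC =====
-- Pre_ excludes association lists with duplicate keys: those do not represent any Python dict
-- (mut_dic is a dict in the Python programs), and on them first-match lookup vs last-write patching
-- are both accidental readings.
def Pre_get_nt_seq (seq : String) (mut_dic : List (Int × String)) : Prop :=
  (mut_dic.map Prod.fst).Nodup
instance (seq : String) (mut_dic : List (Int × String)) : Decidable (Pre_get_nt_seq seq mut_dic) := by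
  unfold Pre_get_nt_seq; infer_instance

def pvWitness_get_nt_seq : String × (List (Int × String)) := ("ATGAAAG", [(1, "CCC"), (9, "TTT"), (-1, "GGG")])

def Spec_get_nt_seq (seq : String) (mut_dic : List (Int × String)) (out : String) : Prop := out = get_nt_seq_alt seq mut_dic
instance (seq : String) (mut_dic : List (Int × String)) (out : String) : Decidable (Spec_get_nt_seq seq mut_dic out) := by unfold Spec_get_nt_seq; infer_instance

-- ===== CLAIM (what is proved, stated in full; the proofs are below) =====
def Claim_equal_get_nt_seq : Prop := ∀ (seq : String) (mut_dic : List (Int × String)), Dom_get_nt_seq seq mut_dic → Pre_get_nt_seq seq mut_dic → Spec_get_nt_seq seq mut_dic (get_nt_seq seq mut_dic)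

-- ===== LEMMAS AND PROOFS =====

def codonChars (cs : List Char) (j : Nat) : List Char := (cs.drop (3 * j)).take 3

def spliceParts (seq : String) : List (Int × String) → Int → List String
  | [], _ => []
  | (p, m) :: rest, cur =>
      PySem.Str.slice seq (some cur) (some (3 * p)) :: m :: spliceParts seq rest (3 * p + 3)

def finalCur : List (Int × String) → Int → Int
  | [], cur => cur
  | (p, _) :: rest, _ => finalCur rest (3 * p + 3)

theorem chunk (cs : List Char) : ∀ (k c : Nat),
    (cs.drop (3 * c)).take (3 * k) = ((List.range' c k).map (codonChars cs)).flatten := by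
  intro k
  induction k with
  | zero => simp
  | succ k ih =>
    intro c
    have h3 : 3 * (k + 1) = 3 + 3 * k := by ring
    rw [h3, List.take_add, List.drop_drop, List.range'_succ, List.map_cons, List.flatten_cons,
      ← ih (c + 1)]
    have : 3 * c + 3 = 3 * (c + 1) := by ring
    rw [this]
    rfl


theorem tailChunk (cs : List Char) (c : Nat) :
    cs.drop (3 * c) = ((List.range' c ((cs.length + 2) / 3 - c)).map (codonChars cs)).flatten := by
  by_cases hc : (cs.length + 2) / 3 ≤ c
  · have h1 : (cs.length + 2) / 3 - c = 0 := by omega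
    have hd : cs.drop (3 * c) = [] := List.drop_eq_nil_iff.mpr (by omega)
    rw [h1, hd]
    simp
  · have hlen : (cs.drop (3 * c)).length ≤ 3 * ((cs.length + 2) / 3 - c) := by
      simp only [List.length_drop]; omega
    rw [← List.take_of_length_le hlen, chunk]

-- codon slice as chars
theorem codon_slice (seq : String) (j : Nat) :
    (PySem.Str.slice seq (some (3 * (j:Int))) (some (3 * (j:Int) + 3))).toList
      = codonChars seq.toList j := by
  have ha : (3 * (j:Int)).toNat = 3 * j := by omega
  have hb : (3 * (j:Int) + 3).toNat = 3 * j + 3 := by omega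
  simp only [PySem.Str.toList_slice, PySem.Chars.slice_eq_listSlice]
  rw [PySem.List.slice_toNat _ (by positivity) (by positivity), ha, hb, codonChars]
  congr 1
  omega

theorem start_slice (seq : String) (c : Nat) :
    (PySem.Str.slice seq (some (3 * (c:Int))) none).toList = seq.toList.drop (3 * c) := by
  have ha : (3 * (c:Int)).toNat = 3 * c := by omega
  simp only [PySem.Str.toList_slice, PySem.Chars.slice_eq_listSlice]
  rw [PySem.List.slice_from _ (by positivity), ha]

theorem seg_slice (seq : String) (c p : Nat) (hcp : c ≤ p) :
    (PySem.Str.slice seq (some (3 * (c:Int))) (some (3 * (p:Int)))).toList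
      = ((List.range' c (p - c)).map (codonChars seq.toList)).flatten := by
  have ha : (3 * (c:Int)).toNat = 3 * c := by omega
  have hb : (3 * (p:Int)).toNat = 3 * p := by omega
  simp only [PySem.Str.toList_slice, PySem.Chars.slice_eq_listSlice]
  rw [PySem.List.slice_toNat _ (by positivity) (by positivity), ha, hb,
    ← chunk seq.toList (p - c) c]
  congr 1
  omega

theorem lookup_eq_none_of_not_mem {β : Type} (l : List (Int × β)) (p : Int)
    (h : p ∉ l.map Prod.fst) : l.lookup p = none := by
  induction l with
  | nil => rfl
  | cons q rest ih =>
    simp only [List.map_cons, List.mem_cons, not_or] at h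
    have hq : (p == q.1) = false := beq_eq_false_iff_ne.mpr h.1
    simp [List.lookup, hq, ih h.2]

-- B's loop, as the recursion spliceParts/finalCur
theorem foldl_splice (seq : String) (ms : List (Int × String)) :
    ∀ (acc : List String) (cur : Int),
      ms.foldl
        (fun (acc : List String × Int) t =>
          (acc.1 ++ [PySem.Str.slice seq (some acc.2) (some (3 * t.1)), t.2], 3 * t.1 + 3))
        (acc, cur)
      = (acc ++ spliceParts seq ms cur, finalCur ms cur) := by
  induction ms with
  | nil => simp [spliceParts, finalCur]
  | cons t rest ih =>
    intro acc cur
    cases t with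
    | mk p m =>
      simp only [List.foldl_cons, spliceParts, finalCur, ih]
      simp

-- the splice output equals the per-codon lookup form, for a strictly key-sorted in-range ms
theorem splice_eq (seq : String) (N : Nat) (hN : N = (seq.toList.length + 2) / 3) :
    ∀ (ms : List (Int × String)) (c : Nat),
      (∀ t ∈ ms, (c:Int) ≤ t.1 ∧ t.1 < (N:Int)) →
      ms.Pairwise (fun a b => a.1 < b.1) →
      ((spliceParts seq ms (3 * (c:Int))
          ++ [PySem.Str.slice seq (some (finalCur ms (3 * (c:Int)))) none]).map String.toList).flatten
      = ((List.range' c (N - c)).map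
          (fun j => ((ms.lookup ((j:Nat):Int)).getD
            (PySem.Str.slice seq (some (3 * (j:Int))) (some (3 * (j:Int) + 3)))).toList)).flatten := by
  intro ms
  induction ms with
  | nil =>
    intro c _ _
    simp only [spliceParts, finalCur, List.nil_append, List.map_cons, List.map_nil,
      List.flatten_cons, List.flatten_nil, List.append_nil, List.lookup_nil, Option.getD_none]
    rw [start_slice, hN, tailChunk]
    congr 1
    exact (List.map_congr_left (fun j _ => (codon_slice seq j))).symm
  | cons t rest ih =>
    intro c hrange hpw
    cases t with
    | mk p m =>
      have hp0 : (c:Int) ≤ p ∧ p < (N:Int) := hrange (p, m) (by simp)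
      set pn := p.toNat with hpn
      have hpcast : p = (pn : Int) := by omega
      have hcp : c ≤ pn := by omega
      have hpN : pn < N := by omega
      have hrest_range : ∀ t ∈ rest, ((pn + 1 : Nat):Int) ≤ t.1 ∧ t.1 < (N:Int) := by
        intro t ht
        have h1 := (List.pairwise_cons.mp hpw).1 t ht
        have h2 := hrange t (List.mem_cons_of_mem _ ht)
        constructor
        · push_cast; omega
        · exact h2.2
      have hrest_pw : rest.Pairwise (fun a b => a.1 < b.1) := (List.pairwise_cons.mp hpw).2
      have ihr := ih (pn + 1) hrest_range hrest_pw
      have hsplit : List.range' c (N - c)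
          = List.range' c (pn - c) ++ pn :: List.range' (pn + 1) (N - (pn + 1)) := by
        have e1 : N - c = (pn - c) + ((N - (pn + 1)) + 1) := by omega
        rw [e1, ← List.range'_append]
        congr 1
        have e2 : c + 1 * (pn - c) = pn := by omega
        rw [e2, List.range'_succ]
      have hcur : 3 * p + 3 = 3 * ((pn + 1 : Nat) : Int) := by push_cast; omega
      have hseg : (PySem.Str.slice seq (some (3 * (c:Int))) (some (3 * p))).toList
          = ((List.range' c (pn - c)).map
              (fun j => ((((p, m) :: rest).lookup ((j:Nat):Int)).getD
                (PySem.Str.slice seq (some (3 * (j:Int))) (some (3 * (j:Int) + 3)))).toList)).flatten := by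
        have hsegL : (PySem.Str.slice seq (some (3 * (c:Int))) (some (3 * p))).toList
            = ((List.range' c (pn - c)).map (codonChars seq.toList)).flatten := by
          rw [hpcast]; exact seg_slice seq c pn hcp
        rw [hsegL]
        congr 1
        apply List.map_congr_left
        intro j hj
        have hjlt : j < pn := by
          have := (List.mem_range'_1.mp hj).2; omega
        have hnone : ((p, m) :: rest).lookup ((j:Nat):Int) = none := by
          apply lookup_eq_none_of_not_mem
          simp only [List.map_cons, List.mem_cons, not_or]
          constructor
          · show ¬ ((j:Nat):Int) = (p, m).1
            simp only
            omega
          · intro hmem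
            rcases List.mem_map.mp hmem with ⟨t, ht, hfst⟩
            have := (hrest_range t ht).1
            omega
        rw [hnone, Option.getD_none, codon_slice]
      have hself : ((p, m) :: rest).lookup ((pn:Nat):Int) = some m := by
        rw [List.lookup_cons]
        have hb : (((pn:Nat):Int) == p) = true := by simp [hpcast]
        simp [hb]
      have htail : ((List.range' (pn + 1) (N - (pn + 1))).map
            (fun j => ((((p, m) :: rest).lookup ((j:Nat):Int)).getD
              (PySem.Str.slice seq (some (3 * (j:Int))) (some (3 * (j:Int) + 3)))).toList)).flatten
          = ((List.range' (pn + 1) (N - (pn + 1))).map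
            (fun j => ((rest.lookup ((j:Nat):Int)).getD
              (PySem.Str.slice seq (some (3 * (j:Int))) (some (3 * (j:Int) + 3)))).toList)).flatten := by
        congr 1
        apply List.map_congr_left
        intro j hj
        have hjgt : pn < j := by
          have := (List.mem_range'_1.mp hj).1; omega
        have hb : (((j:Nat):Int) == p) = false := by
          refine beq_eq_false_iff_ne.mpr ?_
          omega
        rw [List.lookup_cons]
        simp [hb]
      rw [hsplit]
      simp only [spliceParts, finalCur, hcur, List.cons_append, List.map_cons, List.map_append,
        List.flatten_cons, List.flatten_append, List.map_nil, List.flatten_nil, List.append_nil,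
        hself, Option.getD_some]
      rw [htail, ← hseg]
      simp only [List.map_append, List.map_cons, List.map_nil, List.flatten_append,
        List.flatten_cons, List.flatten_nil, List.append_nil] at ihr
      simp [← ihr]

theorem mem_of_lookup_eq_some {β : Type} (l : List (Int × β)) (p : Int) (v : β)
    (h : l.lookup p = some v) : (p, v) ∈ l := by
  induction l with
  | nil => simp [List.lookup] at h
  | cons q rest ih =>
    rw [List.lookup_cons] at h
    by_cases hq : (p == q.1) = true
    · have hp : p = q.1 := by simpa using hq
      simp only [hq] at h
      cases q with | mk a b => exact List.mem_cons.mpr (Or.inl (by simp_all))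
    · simp only [Bool.not_eq_true] at hq
      simp only [hq] at h
      exact List.mem_cons.mpr (Or.inr (ih h))

theorem lookup_eq_some_of_mem {β : Type} (l : List (Int × β)) (p : Int) (v : β)
    (hnd : (l.map Prod.fst).Nodup) (hm : (p, v) ∈ l) : l.lookup p = some v := by
  induction l with
  | nil => cases hm
  | cons q rest ih =>
    simp only [List.map_cons, List.nodup_cons] at hnd
    rcases List.mem_cons.mp hm with h | h
    · rw [← h, List.lookup_cons]; simp
    · have hne : (p == q.1) = false := beq_eq_false_iff_ne.mpr
        (fun he => hnd.1 (he ▸ List.mem_map_of_mem (f := Prod.fst) h))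
      rw [List.lookup_cons]
      simp only [hne]
      exact ih hnd.2 h

-- first-match lookup in a duplicate-free association list is invariant under permutation
theorem lookup_perm {β : Type} (l₁ l₂ : List (Int × β)) (p : Int)
    (hnd : (l₁.map Prod.fst).Nodup) (hp : l₁.Perm l₂) : l₁.lookup p = l₂.lookup p := by
  have hnd₂ : (l₂.map Prod.fst).Nodup := ((hp.map Prod.fst).nodup_iff).mp hnd
  cases h : l₁.lookup p with
  | none =>
    refine (lookup_eq_none_of_not_mem l₂ p ?_).symm
    intro hmem
    rcases List.mem_map.mp hmem with ⟨t, ht, hfst⟩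
    have : l₁.lookup p = some t.2 :=
      lookup_eq_some_of_mem l₁ p t.2 hnd (by
        have : t = (p, t.2) := by cases t; cases hfst; rfl
        exact this ▸ (hp.mem_iff.mpr ht))
    simp [h] at this
  | some v =>
    exact (lookup_eq_some_of_mem l₂ p v hnd₂ (hp.mem_iff.mp (mem_of_lookup_eq_some l₁ p v h))).symm

-- lookup through a key-only filter whose predicate holds at the key
theorem lookup_filter {β : Type} (l : List (Int × β)) (P : Int → Bool) (k : Int)
    (hk : P k = true) : (l.filter (fun t => P t.1)).lookup k = l.lookup k := by
  induction l with
  | nil => rfl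
  | cons q rest ih =>
    by_cases hq : (k == q.1) = true
    · have h2 : P q.1 = true := (eq_of_beq hq) ▸ hk
      rw [List.filter_cons, if_pos (by simpa using h2), List.lookup_cons, List.lookup_cons]
      simp [hq]
    · simp only [Bool.not_eq_true] at hq
      by_cases hPq : P q.1 = true
      · rw [List.filter_cons, if_pos (by simpa using hPq), List.lookup_cons, List.lookup_cons]
        simp [hq, ih]
      · simp only [Bool.not_eq_true] at hPq
        rw [List.filter_cons, if_neg (by simp [hPq]), List.lookup_cons]
        simp [hq, ih]

theorem join_empty_eq_flatten (ls : List (List Char)) : PySem.Chars.join [] ls = ls.flatten := by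
  induction ls with
  | nil => rfl
  | cons a t ih =>
    cases t with
    | nil => simp [PySem.Chars.join, List.intercalate]
    | cons b r => rw [PySem.Chars.join_cons_cons, List.flatten_cons, ← ih]; simp

-- A's patch loop over a duplicate-free association list is pointwise first-match lookup.
theorem patch_eq_lookup (md : List (Int × String)) (hnd : (md.map Prod.fst).Nodup)
    (cs : List String) :
    md.foldl
      (fun cs pm =>
        if 0 ≤ pm.1 ∧ pm.1 < PySem.List.len cs then PySem.List.pySetD cs pm.1 pm.2 else cs)
      cs
    = cs.mapIdx (fun j c => ((md.lookup (j : Int)).getD c)) := by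
  induction md generalizing cs with
  | nil =>
    simp [List.lookup, List.mapIdx_eq_zipIdx_map]
  | cons pm rest ih =>
    obtain ⟨p, m⟩ := pm
    simp only [List.map_cons, List.nodup_cons] at hnd
    obtain ⟨hp, hrest⟩ := hnd
    simp only [List.foldl_cons]
    rw [ih hrest]
    apply List.ext_getElem?
    intro j
    simp only [List.getElem?_mapIdx]
    by_cases hlt : j < cs.length
    · by_cases hc : 0 ≤ p ∧ p < PySem.List.len cs
      · rw [if_pos hc, PySem.List.pySetD_of_nonneg cs m hc.1]
        by_cases hj : p = (j : Int)
        · have htn : p.toNat = j := by omega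
          have hnone : rest.lookup ((j : Int)) = none :=
            lookup_eq_none_of_not_mem rest _ (hj ▸ hp)
          have hbeq : (((j : Int)) == p) = true := by simp [hj]
          rw [htn, List.getElem?_set_self hlt, List.getElem?_eq_getElem hlt]
          simp [List.lookup, hbeq, hnone]
        · have htn : p.toNat ≠ j := by omega
          have hbeq : (((j : Int)) == p) = false :=
            beq_eq_false_iff_ne.mpr (fun he => hj he.symm)
          rw [List.getElem?_set_ne htn]
          simp [List.lookup, hbeq]
      · rw [if_neg hc]
        have hj : p ≠ (j : Int) := by
          intro he
          apply hc
          refine ⟨he ▸ Int.natCast_nonneg j, ?_⟩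
          simp only [PySem.List.len_eq, he]
          exact_mod_cast hlt
        have hbeq : (((j : Int)) == p) = false :=
          beq_eq_false_iff_ne.mpr (fun he => hj he.symm)
        simp [List.lookup, hbeq]
    · have hnone₁ : cs[j]? = none := List.getElem?_eq_none (by omega)
      have hlen : (if 0 ≤ p ∧ p < PySem.List.len cs then PySem.List.pySetD cs p m else cs).length
          = cs.length := by
        split_ifs with h
        · exact PySem.List.length_pySetD _ _ _
        · rfl
      have hnone₂ :
          (if 0 ≤ p ∧ p < PySem.List.len cs then PySem.List.pySetD cs p m else cs)[j]? = none :=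
        List.getElem?_eq_none (hlen.le.trans (by omega))
      rw [hnone₂, hnone₁]
      rfl

theorem mapIdx_map_range {β γ : Type} (n : Nat) (g : Nat → β) (h : Nat → β → γ) :
    ((List.range n).map g).mapIdx h = (List.range n).map (fun j => h j (g j)) := by
  apply List.ext_getElem
  · simp
  · intro j h1 h2
    simp

theorem get_nt_seq_eq_alt (seq : String) (mut_dic : List (Int × String))
    (hnd : (mut_dic.map Prod.fst).Nodup) :
    get_nt_seq seq mut_dic = get_nt_seq_alt seq mut_dic := by
  have hN3 : (0:Int) < 3 := by norm_num
  have hA : get_nt_seq seq mut_dic = PySem.Str.join ""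
      ((List.range ((seq.toList.length + 2) / 3)).map
        (fun j => ((mut_dic.lookup ((j:Nat):Int)).getD
          (PySem.Str.slice seq (some (3 * (j:Int))) (some (3 * (j:Int) + 3)))))) := by
    unfold get_nt_seq
    simp only
    rw [patch_eq_lookup mut_dic hnd]
    rw [PySem.List.pyRange_of_pos 0 (PySem.Str.len seq) hN3, List.map_map, mapIdx_map_range]
    congr 1
    have hKN : (if (0:Int) < PySem.Str.len seq
        then ((PySem.Str.len seq - 0 + 3 - 1) / 3).toNat else 0) = (seq.toList.length + 2) / 3 := by
      simp only [PySem.Str.len_eq]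
      split_ifs with h <;> omega
    rw [hKN]
    apply List.map_congr_left
    intro j hj
    have h0 : (0:Int) + 3 * (j:Int) = 3 * (j:Int) := by ring
    simp [Function.comp, h0]
  have hncN : PySem.Int.floordiv (PySem.Str.len seq + 2) 3
      = (((seq.toList.length + 2) / 3 : Nat) : Int) := by
    rw [PySem.Int.floordiv_eq_ediv_of_pos hN3]
    simp only [PySem.Str.len_eq]
    omega
  unfold get_nt_seq_alt
  simp only [hncN]
  have hnd_f : ((mut_dic.filter
      (fun t => decide (0 ≤ t.1 ∧ t.1 < (((seq.toList.length + 2) / 3 : Nat) : Int)))).map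
        Prod.fst).Nodup :=
    (List.filter_sublist.map Prod.fst).nodup hnd
  have hperm := PySem.List.sorted_perm
    (mut_dic.filter
      (fun t => decide (0 ≤ t.1 ∧ t.1 < (((seq.toList.length + 2) / 3 : Nat) : Int))))
    (fun t : Int × String => t.1) false
  have hnd_m := ((hperm.map Prod.fst).nodup_iff).mpr hnd_f
  have hpw_le := PySem.List.sorted_pairwise
    (mut_dic.filter
      (fun t => decide (0 ≤ t.1 ∧ t.1 < (((seq.toList.length + 2) / 3 : Nat) : Int))))
    (fun t : Int × String => t.1)
  have hpw_ne : (PySem.List.sorted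
      (mut_dic.filter
        (fun t => decide (0 ≤ t.1 ∧ t.1 < (((seq.toList.length + 2) / 3 : Nat) : Int))))
      (fun t : Int × String => t.1)).Pairwise (fun a b => a.1 ≠ b.1) :=
    List.pairwise_map.mp hnd_m
  have hpw := (hpw_le.and hpw_ne).imp (fun {a b} h => lt_of_le_of_ne h.1 h.2)
  have hrange : ∀ t ∈ PySem.List.sorted
      (mut_dic.filter
        (fun t => decide (0 ≤ t.1 ∧ t.1 < (((seq.toList.length + 2) / 3 : Nat) : Int))))
      (fun t : Int × String => t.1),
      (((0:Nat)):Int) ≤ t.1 ∧ t.1 < (((seq.toList.length + 2) / 3 : Nat) : Int) := by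
    intro t ht
    have := List.of_mem_filter (hperm.mem_iff.mp ht)
    simpa using this
  rw [foldl_splice]
  dsimp only [List.nil_append]
  apply String.ext
  rw [hA, PySem.Str.toList_join, PySem.Str.toList_join]
  have hsep : ("":String).toList = ([] : List Char) := rfl
  rw [hsep, join_empty_eq_flatten, join_empty_eq_flatten]
  have hsp := splice_eq seq ((seq.toList.length + 2) / 3) rfl _ 0 hrange hpw
  rw [show (3 * (((0:Nat)):Int)) = (0:Int) from by norm_num] at hsp
  rw [hsp]
  rw [List.map_map, List.range_eq_range']
  simp only [Nat.sub_zero]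
  apply congrArg
  apply List.map_congr_left
  intro j hj
  have hjN : j < (seq.toList.length + 2) / 3 := by
    have := List.mem_range'_1.mp hj; omega
  have hlk : (PySem.List.sorted
      (mut_dic.filter
        (fun t => decide (0 ≤ t.1 ∧ t.1 < (((seq.toList.length + 2) / 3 : Nat) : Int))))
      (fun t : Int × String => t.1)).lookup ((j:Nat):Int) = mut_dic.lookup ((j:Nat):Int) := by
    rw [lookup_perm _ _ _ hnd_m hperm]
    exact lookup_filter mut_dic
      (fun x => decide (0 ≤ x ∧ x < (((seq.toList.length + 2) / 3 : Nat) : Int))) _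
      (by
        simp only [decide_eq_true_eq]
        exact ⟨Int.natCast_nonneg j, by exact_mod_cast hjN⟩)
  rw [hlk]
  rfl

-- ===== VERDICT (by name: the statement is the Claim_ definition above) =====
theorem get_nt_seq_spec : Claim_equal_get_nt_seq := by
  intro seq mut_dic _ hpre
  unfold Spec_get_nt_seq
  exact get_nt_seq_eq_alt seq mut_dic hpre
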